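-- pv_equiv track=rewrite | github.com/sathyaganesan/Comcast_CodeChallenge | Pencil.py | getTextByCount
-- ===== SOURCE A (Python) =====
-- def getTextByCount(str, n):
--     s= "";
--     count = 0;
--     for i in str:
--         if(i>="A" and i<="Z"):
--             count += 2;
--         else:
--             count += 1;
--         if(count <= n):
--             s += i
--         else:
--             return s;
--     return s;
-- ===== SOURCE B (Python) =====
-- def getTextByCount(str, n):
--     # Phase 1: build the table of cumulative weighted counts.
--     cums = []
--     total = 0
--     for c in str:
--         total += 2 if "A" <= c <= "Z" else 1
--         cums.append(total)
--     # Phase 2: find the first cumulative total strictly greater than n.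
--     cutoff = len(str)
--     for i, t in enumerate(cums):
--         if t > n:
--             cutoff = i
--             break
--     return str[:cutoff]
-- ===== Notes on version B (the rewrite author's own statement) =====
-- stated objective: alternative
-- what changed: Replaces A's single loop with early return by two distinct phases: build a list of cumulative weighted counts, then locate the first cumulative total strictly greater than n and slice the string up to that index.
import Mathlib
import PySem

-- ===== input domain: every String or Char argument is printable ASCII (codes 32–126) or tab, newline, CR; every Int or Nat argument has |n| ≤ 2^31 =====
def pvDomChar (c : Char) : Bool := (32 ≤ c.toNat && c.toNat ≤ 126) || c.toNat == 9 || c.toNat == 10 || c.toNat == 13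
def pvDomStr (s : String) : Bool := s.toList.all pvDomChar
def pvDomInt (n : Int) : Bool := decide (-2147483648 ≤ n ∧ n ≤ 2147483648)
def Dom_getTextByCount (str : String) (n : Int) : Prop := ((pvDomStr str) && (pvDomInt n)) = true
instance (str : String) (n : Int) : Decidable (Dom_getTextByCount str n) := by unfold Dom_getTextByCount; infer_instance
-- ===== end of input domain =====

-- B rebuilds A's early-return accumulation as two distinct phases (cumulative-count table, then
-- cutoff search + slice); objective: alternative decomposition, same cost.

-- ===== PORT A =====
-- A's loop: state (s, count), early return when count exceeds n.
def pvGoA (n : Int) : List Char → List Char → Int → List Char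
  | [], s, _ => s
  | c :: rest, s, count =>
    let count' := if 'A' ≤ c ∧ c ≤ 'Z' then count + 2 else count + 1
    if count' ≤ n then pvGoA n rest (s ++ [c]) count' else s

def getTextByCount (str : String) (n : Int) : String :=
  String.ofList (pvGoA n str.toList [] 0)

-- ===== PORT B =====
def pvWeight (c : Char) : Int := if 'A' ≤ c ∧ c ≤ 'Z' then 2 else 1

-- Phase 1 of Source B: the list of cumulative weighted counts (loop appending the running total).
def pvCums (cs : List Char) : List Int :=
  (cs.foldl (fun (acc : List Int × Int) c =>
    let t := acc.2 + pvWeight c; (acc.1 ++ [t], t)) ([], 0)).1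

-- Phase 2 of Source B: enumerate-with-break, first index whose total exceeds n (default: full length).
def pvCut (n : Int) (len : Nat) : List Int → Nat → Nat
  | [], _ => len
  | t :: rest, i => if n < t then i else pvCut n len rest (i + 1)

def getTextByCount_alt (str : String) (n : Int) : String :=
  String.ofList (str.toList.take (pvCut n str.toList.length (pvCums str.toList) 0))

-- ===== PRECONDITION & SPEC =====
def Spec_getTextByCount (str : String) (n : Int) (out : String) : Prop := out = getTextByCount_alt str n
instance (str : String) (n : Int) (out : String) : Decidable (Spec_getTextByCount str n out) := by unfold Spec_getTextByCount; infer_instance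

-- ===== CLAIM (what is proved, stated in full; the proofs are below) =====
def Claim_equal_getTextByCount : Prop := ∀ (str : String) (n : Int), Dom_getTextByCount str n → Spec_getTextByCount str n (getTextByCount str n)

-- ===== LEMMAS AND PROOFS =====

-- the cumulative totals as a structural scan, for induction
def pvScan (c0 : Int) : List Char → List Int
  | [] => []
  | c :: cs => (c0 + pvWeight c) :: pvScan (c0 + pvWeight c) cs

theorem pvCums_foldl (cs : List Char) : ∀ (acc : List Int) (t : Int),
    (cs.foldl (fun (acc : List Int × Int) c =>
      let t := acc.2 + pvWeight c; (acc.1 ++ [t], t)) (acc, t)).1 = acc ++ pvScan t cs := by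
  induction cs with
  | nil => intro acc t; simp [pvScan]
  | cons c cs ih =>
      intro acc t
      simp only [List.foldl, pvScan]
      rw [ih]
      simp

theorem pvCums_eq_scan (cs : List Char) : pvCums cs = pvScan 0 cs := by
  unfold pvCums
  rw [pvCums_foldl cs [] 0]
  simp

theorem pvScan_length (cs : List Char) : ∀ c0, (pvScan c0 cs).length = cs.length := by
  induction cs with
  | nil => intro c0; simp [pvScan]
  | cons c cs ih => intro c0; simp [pvScan, ih]

theorem pvCut_eq_takeWhile (n : Int) (cums : List Int) : ∀ (i len : Nat),
    len = i + cums.length →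
    pvCut n len cums i = i + (cums.takeWhile (fun t => decide (t ≤ n))).length := by
  induction cums with
  | nil => intro i len h; simp [pvCut, h]
  | cons t rest ih =>
      intro i len h
      by_cases ht : n < t
      · simp [pvCut, ht, show ¬ t ≤ n by omega]
      · simp only [pvCut, if_neg ht, List.takeWhile_cons]
        rw [ih (i + 1) len (by simp [h]; omega)]
        simp [show t ≤ n by omega]
        omega

theorem pvGoA_eq (n : Int) (cs : List Char) : ∀ (s : List Char) (c0 : Int),
    pvGoA n cs s c0 = s ++ cs.take ((pvScan c0 cs).takeWhile (fun t => decide (t ≤ n))).length := by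
  induction cs with
  | nil => intro s c0; simp [pvGoA, pvScan]
  | cons c cs ih =>
      intro s c0
      have hw : (if 'A' ≤ c ∧ c ≤ 'Z' then c0 + 2 else c0 + 1) = c0 + pvWeight c := by
        unfold pvWeight; split_ifs <;> ring
      by_cases h : c0 + pvWeight c ≤ n
      · simp only [pvGoA, hw, if_pos h, pvScan, List.takeWhile_cons]
        rw [ih (s ++ [c]) (c0 + pvWeight c)]
        simp [h]
      · simp only [pvGoA, hw, if_neg h, pvScan, List.takeWhile_cons]
        simp [h]

-- ===== VERDICT (by name: the statement is the Claim_ definition above) =====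
theorem getTextByCount_spec : Claim_equal_getTextByCount := by
  intro str n _
  unfold Spec_getTextByCount getTextByCount getTextByCount_alt
  rw [pvGoA_eq, pvCums_eq_scan,
      pvCut_eq_takeWhile n (pvScan 0 str.toList) 0 str.toList.length
        (by simp [pvScan_length])]
  simp
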